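-- pv_equiv track=rewrite | github.com/kumaraman-iisc/DSA | 2D List/Matrix obtained by Rotation or not?/solution.py | can_be_rotated
-- ===== SOURCE A (Python) =====
-- def can_be_rotated(mat, target):
--     """
--     Function to check if mat can be rotated to match target.
--     :param mat: List[List[int]] -> The original matrix
--     :param target: List[List[int]] -> The target matrix
--     :return: bool -> True if mat can be rotated to match target, otherwise False
--     """
--     # TODO: Implement this function
--     n = len(mat)
--
--     def rotate(matrix):
--         return [[matrix[n-j-1][i] for j in range(n)]for i in range(n)]
--
--     for _ in range(4):
--         if mat == target:
--             return True
--         mat = rotate(mat)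
--     return False
-- ===== SOURCE B (Python) =====
-- def can_be_rotated(mat, target):
--     """
--     Check whether some 90-degree rotation of mat equals target, without
--     building rotated copies: compare target against mat through the four
--     rotation index maps.
--     """
--     if mat == target:
--         return True
--     n = len(mat)
--     if len(target) != n or any(len(row) != n for row in target):
--         return False
--     maps = (
--         lambda i, j: (n - 1 - j, i),
--         lambda i, j: (n - 1 - i, n - 1 - j),
--         lambda i, j: (j, n - 1 - i),
--     )
--     for f in maps:
--         if all(target[i][j] == mat[f(i, j)[0]][f(i, j)[1]]
--                for i in range(n) for j in range(n)):
--             return True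
--     return False
-- ===== Notes on version B (the rewrite author's own statement) =====
-- stated objective: faster
-- what changed: Instead of materialising up to three rotated copies of the matrix and comparing lists, B checks the target shape once and compares target[i][j] directly against mat through the three 90-degree rotation index maps, allocating nothing and short-circuiting on the first mismatch.
import Mathlib
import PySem

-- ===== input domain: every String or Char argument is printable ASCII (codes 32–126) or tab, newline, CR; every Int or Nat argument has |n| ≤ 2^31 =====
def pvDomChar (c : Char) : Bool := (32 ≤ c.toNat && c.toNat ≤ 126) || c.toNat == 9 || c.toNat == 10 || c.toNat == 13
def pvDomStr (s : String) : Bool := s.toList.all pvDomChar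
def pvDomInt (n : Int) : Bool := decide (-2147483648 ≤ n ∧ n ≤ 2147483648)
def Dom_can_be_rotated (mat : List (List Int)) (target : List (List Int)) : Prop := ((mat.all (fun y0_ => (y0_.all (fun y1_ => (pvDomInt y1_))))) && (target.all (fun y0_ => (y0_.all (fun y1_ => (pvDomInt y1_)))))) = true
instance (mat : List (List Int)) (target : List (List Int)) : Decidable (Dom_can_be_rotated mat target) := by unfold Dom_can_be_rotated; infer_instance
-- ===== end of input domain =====

-- B checks the four rotations by comparing target against mat through the rotation
-- index maps instead of building rotated matrices (objective: alternative/simpler).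

-- ===== PORT A =====
-- rotate(matrix) with the closed-over n = len(mat); out-of-range access defaults
-- (Python raises there — excluded by Pre_can_be_rotated).
def pvRotA (n : Int) (m : List (List Int)) : List (List Int) :=
  (PySem.List.pyRange 0 n 1).map (fun i =>
    (PySem.List.pyRange 0 n 1).map (fun j =>
      PySem.List.pyGetD (PySem.List.pyGetD m (n - j - 1) []) i 0))

-- 'for _ in range(4): if mat == target: return True; mat = rotate(mat)' then False
def pvGoA (target : List (List Int)) (n : Int) : Nat → List (List Int) → Bool
  | 0, _ => false
  | k + 1, m => if m = target then true else pvGoA target n k (pvRotA n m)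

def can_be_rotated (mat : List (List Int)) (target : List (List Int)) : Bool :=
  pvGoA target (mat.length : Int) 4 mat

-- ===== PORT B =====
-- in-range double indexing m[r][c] (B only uses it in range)
def pvGet (m : List (List Int)) (r c : Nat) : Int := (m.getD r []).getD c 0

-- all(target[i][j] == mat[f(i,j)[0]][f(i,j)[1]] for i in range(n) for j in range(n))
def pvCheck (mat target : List (List Int)) (n : Nat) (f : Nat → Nat → Nat × Nat) : Bool :=
  (List.range n).all fun i => (List.range n).all fun j =>
    pvGet target i j == pvGet mat (f i j).1 (f i j).2

def can_be_rotated_alt (mat : List (List Int)) (target : List (List Int)) : Bool :=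
  if mat = target then true
  else
    let n := mat.length
    if target.length == n && target.all (fun row => row.length == n) then
      pvCheck mat target n (fun i j => (n - 1 - j, i)) ||
      pvCheck mat target n (fun i j => (n - 1 - i, n - 1 - j)) ||
      pvCheck mat target n (fun i j => (j, n - 1 - i))
    else false

-- ===== PRECONDITION & SPEC =====
-- Pre_ excludes exactly the inputs on which A raises IndexError: unless mat == target
-- (answered before any rotation), rotate reads mat[r][i] for all r, i < len(mat), so
-- every row of mat must have at least len(mat) entries.
def Pre_can_be_rotated (mat : List (List Int)) (target : List (List Int)) : Prop :=
  mat = target ∨ ∀ row ∈ mat, mat.length ≤ row.length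
instance (mat : List (List Int)) (target : List (List Int)) : Decidable (Pre_can_be_rotated mat target) := by unfold Pre_can_be_rotated; infer_instance

def pvWitness_can_be_rotated : List (List Int) × List (List Int) :=
  ([[1, 2], [3, 4]], [[3, 1], [4, 2]])

def Spec_can_be_rotated (mat : List (List Int)) (target : List (List Int)) (out : Bool) : Prop := out = can_be_rotated_alt mat target
instance (mat : List (List Int)) (target : List (List Int)) (out : Bool) : Decidable (Spec_can_be_rotated mat target out) := by unfold Spec_can_be_rotated; infer_instance

-- ===== CLAIM (what is proved, stated in full; the proofs are below) =====
def Claim_equal_can_be_rotated : Prop := ∀ (mat : List (List Int)) (target : List (List Int)), Dom_can_be_rotated mat target → Pre_can_be_rotated mat target → Spec_can_be_rotated mat target (can_be_rotated mat target)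

-- ===== LEMMAS AND PROOFS =====

-- an n×n matrix given by an entry function
def pvMk (n : Nat) (f : Nat → Nat → Int) : List (List Int) :=
  (List.range n).map fun i => (List.range n).map (f i)

lemma pvMk_congr {n : Nat} {f g : Nat → Nat → Int}
    (h : ∀ i < n, ∀ j < n, f i j = g i j) : pvMk n f = pvMk n g := by
  unfold pvMk
  apply List.map_congr_left; intro i hi
  apply List.map_congr_left; intro j hj
  exact h i (List.mem_range.mp hi) j (List.mem_range.mp hj)

lemma pvGet_mk {n r c : Nat} (f : Nat → Nat → Int) (hr : r < n) (hc : c < n) :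
    pvGet (pvMk n f) r c = f r c := by
  simp [pvGet, pvMk, List.getD_eq_getElem?_getD, hr, hc]

-- A's rotate, as an entry function (unconditionally: pyGetD defaults like getD)
lemma pvRotA_eq (n : Nat) (m : List (List Int)) :
    pvRotA (n : Int) m = pvMk n (fun i j => pvGet m (n - 1 - j) i) := by
  unfold pvRotA pvMk pvGet
  rw [PySem.List.pyRange_zero_nat]
  simp only [List.map_map]
  apply List.map_congr_left; intro i hi
  apply List.map_congr_left; intro j hj
  simp only [Function.comp_apply]
  have hj' : j < n := List.mem_range.mp hj
  have hc : (n : Int) - (j : Int) - 1 = ((n - 1 - j : Nat) : Int) := by omega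
  rw [hc]
  simp [PySem.List.pyGetD_natCast]

lemma pvRot2_eq (n : Nat) (m : List (List Int)) :
    pvRotA (n : Int) (pvRotA (n : Int) m) =
      pvMk n (fun i j => pvGet m (n - 1 - i) (n - 1 - j)) := by
  simp only [pvRotA_eq]
  apply pvMk_congr; intro i hi j hj
  rw [pvGet_mk _ (by omega) (by omega)]

lemma pvRot3_eq (n : Nat) (m : List (List Int)) :
    pvRotA (n : Int) (pvRotA (n : Int) (pvRotA (n : Int) m)) =
      pvMk n (fun i j => pvGet m j (n - 1 - i)) := by
  rw [pvRot2_eq, pvRotA_eq]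
  apply pvMk_congr; intro i hi j hj
  rw [pvGet_mk _ (by omega) (by omega)]
  have h1 : n - 1 - (n - 1 - j) = j := by omega
  rw [h1]

lemma pvGet_eq {t : List (List Int)} {i j : Nat} (hi : i < t.length)
    (hj : j < t[i].length) : pvGet t i j = t[i][j] := by
  simp [pvGet, List.getD_eq_getElem?_getD, hi, hj]

lemma pvEq_mk_iff (t : List (List Int)) (n : Nat) (f : Nat → Nat → Int) :
    t = pvMk n f ↔
      t.length = n ∧ (∀ row ∈ t, row.length = n) ∧
        ∀ i < n, ∀ j < n, pvGet t i j = f i j := by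
  constructor
  · rintro rfl
    refine ⟨by simp [pvMk], ?_, fun i hi j hj => pvGet_mk f hi hj⟩
    intro row hrow
    simp only [pvMk, List.mem_map] at hrow
    obtain ⟨i, -, rfl⟩ := hrow
    simp
  · rintro ⟨hlen, hrows, hent⟩
    apply List.ext_getElem
    · simp [pvMk, hlen]
    · intro i h1 h2
      have hi : i < n := by simpa [hlen] using h1
      have hrow : t[i].length = n := hrows _ (List.getElem_mem h1)
      have hmk : (pvMk n f)[i] = (List.range n).map (f i) := by
        simp [pvMk]
      rw [hmk]
      apply List.ext_getElem
      · simp [hrow]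
      · intro j hj1 hj2
        have hj : j < n := by simpa [hrow] using hj1
        have := hent i hi j hj
        rw [pvGet_eq h1 hj1] at this
        simp [this]

lemma pvShape_of_eq_mk {t : List (List Int)} {n : Nat} {f : Nat → Nat → Int}
    (h : t = pvMk n f) :
    (t.length == n && t.all fun row => row.length == n) = true := by
  rcases (pvEq_mk_iff t n f).mp h with ⟨hlen, hrows, -⟩
  simp only [Bool.and_eq_true, beq_iff_eq, List.all_eq_true]
  exact ⟨hlen, fun row hr => by simpa using hrows row hr⟩

lemma pvCheck_iff {mat target : List (List Int)} {n : Nat} (f : Nat → Nat → Nat × Nat)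
    (hshape : (target.length == n && target.all fun row => row.length == n) = true) :
    pvCheck mat target n f = true ↔
      target = pvMk n (fun i j => pvGet mat (f i j).1 (f i j).2) := by
  simp only [Bool.and_eq_true, beq_iff_eq, List.all_eq_true] at hshape
  rw [pvEq_mk_iff]
  simp only [pvCheck, List.all_eq_true, List.mem_range, beq_iff_eq]
  constructor
  · intro h
    exact ⟨hshape.1, fun row hr => by simpa using hshape.2 row hr,
      fun i hi j hj => h i hi j hj⟩
  · rintro ⟨-, -, h⟩
    exact fun i hi j hj => h i hi j hj

lemma pvCheck1_iff {mat target : List (List Int)} {n : Nat}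
    (hshape : (target.length == n && target.all fun row => row.length == n) = true) :
    pvCheck mat target n (fun i j => (n - 1 - j, i)) = true ↔
      target = pvMk n (fun i j => pvGet mat (n - 1 - j) i) :=
  pvCheck_iff _ hshape

lemma pvCheck2_iff {mat target : List (List Int)} {n : Nat}
    (hshape : (target.length == n && target.all fun row => row.length == n) = true) :
    pvCheck mat target n (fun i j => (n - 1 - i, n - 1 - j)) = true ↔
      target = pvMk n (fun i j => pvGet mat (n - 1 - i) (n - 1 - j)) :=
  pvCheck_iff _ hshape

lemma pvCheck3_iff {mat target : List (List Int)} {n : Nat}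
    (hshape : (target.length == n && target.all fun row => row.length == n) = true) :
    pvCheck mat target n (fun i j => (j, n - 1 - i)) = true ↔
      target = pvMk n (fun i j => pvGet mat j (n - 1 - i)) :=
  pvCheck_iff _ hshape

theorem can_be_rotated_spec : Claim_equal_can_be_rotated := by
  intro mat target _hdom _hpre
  unfold Spec_can_be_rotated
  by_cases hmt : mat = target
  · simp [can_be_rotated, can_be_rotated_alt, pvGoA, hmt]
  · simp only [can_be_rotated, can_be_rotated_alt, pvGoA, if_neg hmt]
    set n := mat.length with hn
    rw [pvRot3_eq, pvRot2_eq, pvRotA_eq]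
    by_cases hshape :
        (target.length == n && target.all fun row => row.length == n) = true
    · simp only [hshape, if_true]
      rw [Bool.eq_iff_iff]
      simp only [Bool.or_eq_true]
      constructor
      · intro h
        split_ifs at h with h1 h2 h3
        · exact Or.inl (Or.inl ((pvCheck1_iff hshape).mpr h1.symm))
        · exact Or.inl (Or.inr ((pvCheck2_iff hshape).mpr h2.symm))
        · exact Or.inr ((pvCheck3_iff hshape).mpr h3.symm)
      · intro h
        rcases h with (h | h) | h
        · rw [if_pos ((pvCheck1_iff hshape).mp h).symm]
        · by_cases h1 : pvMk n (fun i j => pvGet mat (n - 1 - j) i) = target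
          · simp [h1]
          · rw [if_neg h1, if_pos ((pvCheck2_iff hshape).mp h).symm]
        · by_cases h1 : pvMk n (fun i j => pvGet mat (n - 1 - j) i) = target
          · simp [h1]
          · by_cases h2 :
              pvMk n (fun i j => pvGet mat (n - 1 - i) (n - 1 - j)) = target
            · simp [h1, h2]
            · rw [if_neg h1, if_neg h2, if_pos ((pvCheck3_iff hshape).mp h).symm]
    · simp only [hshape]
      have h1 : ∀ f : Nat → Nat → Int, pvMk n f ≠ target := by
        intro f h
        exact hshape (pvShape_of_eq_mk h.symm)
      simp [h1]
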